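-- pv_equiv track=rewrite | github.com/Eunsol-Lee/projectEulerPythonSolve | p21 Amicable numbers.py | sumDivisor
-- ===== SOURCE A (Python) =====
-- def sumDivisor(x):
--     total = 1
--     for key in x.keys():
--         p = 1
--         for j in range(1, x[key] + 1):
--             p +=  key ** j
--         total *= p
--
--     return total
-- ===== SOURCE B (Python) =====
-- def sumDivisor(x):
--     total = 1
--     for p, e in x.items():
--         if e > 0:
--             total *= (e + 1) if p == 1 else (p ** (e + 1) - 1) // (p - 1)
--     return total
-- ===== Notes on version B (the rewrite author's own statement) =====
-- stated objective: simpler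
-- what changed: The inner loop summing key**j term by term is replaced by the closed-form geometric-series factor (p**(e+1)-1)//(p-1) (e+1 when p==1), so each prime contributes in O(1) big-int operations instead of a loop of e exponentiations.
import Mathlib
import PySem

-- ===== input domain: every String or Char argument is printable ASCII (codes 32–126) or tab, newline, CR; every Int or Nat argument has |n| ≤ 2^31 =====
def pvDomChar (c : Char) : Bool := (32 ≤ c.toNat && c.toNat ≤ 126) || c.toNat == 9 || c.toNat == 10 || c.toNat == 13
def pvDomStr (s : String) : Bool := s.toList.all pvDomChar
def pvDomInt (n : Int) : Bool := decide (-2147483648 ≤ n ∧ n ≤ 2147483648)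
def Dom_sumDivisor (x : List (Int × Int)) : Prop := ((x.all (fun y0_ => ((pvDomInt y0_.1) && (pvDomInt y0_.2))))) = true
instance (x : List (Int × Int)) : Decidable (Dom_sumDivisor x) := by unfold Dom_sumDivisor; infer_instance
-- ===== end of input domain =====

-- B replaces A's per-exponent inner summation loop by the closed-form geometric-series factor.

-- ===== PORT A =====
-- A iterates the dict's keys and looks up x[key]; as an association list (a dict never
-- holds a key twice) this is the fold over the (key, value) pairs in insertion order.
-- 'key ** j' with j ≥ 1 from range(1, e+1) is ported as kv.1 ^ j.toNat (exact for j ≥ 0).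
def sumDivisor (x : List (Int × Int)) : Int :=
  x.foldl
    (fun total kv =>
      total * ((PySem.List.pyRange 1 (kv.2 + 1) 1).foldl (fun p j => p + kv.1 ^ j.toNat) 1))
    1

-- ===== PORT B =====
-- 'p ** (e + 1)' with e + 1 ≥ 2 inside the e > 0 branch is ported as pe.1 ^ (pe.2 + 1).toNat.
def sumDivisor_alt (x : List (Int × Int)) : Int :=
  x.foldl
    (fun total pe =>
      if pe.2 > 0 then
        total * (if pe.1 = 1 then pe.2 + 1
                 else PySem.Int.floordiv (pe.1 ^ (pe.2 + 1).toNat - 1) (pe.1 - 1))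
      else total)
    1

-- ===== PRECONDITION & SPEC =====
def Spec_sumDivisor (x : List (Int × Int)) (out : Int) : Prop := out = sumDivisor_alt x
instance (x : List (Int × Int)) (out : Int) : Decidable (Spec_sumDivisor x out) := by unfold Spec_sumDivisor; infer_instance

-- ===== CLAIM (what is proved, stated in full; the proofs are below) =====
def Claim_equal_sumDivisor : Prop := ∀ (x : List (Int × Int)), Dom_sumDivisor x → Spec_sumDivisor x (sumDivisor x)

-- ===== LEMMAS AND PROOFS =====

-- A's inner loop over range(1, n+1) computes the full geometric sum ∑_{j=0}^{n} p^j.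
theorem pvInnerSum (p : Int) (n : Nat) :
    (PySem.List.pyRange 1 ((n : Int) + 1) 1).foldl (fun acc j => acc + p ^ j.toNat) 1
      = ∑ j ∈ Finset.range (n + 1), p ^ j := by
  induction n with
  | zero => simp [PySem.List.pyRange_one_eq_nil]
  | succ m ih =>
    have h : ((m : Int) + 1 + 1) = ((m : Int) + 1) + 1 := by ring
    rw [show ((((m : Nat) + 1 : Nat)) : Int) + 1 = ((m : Int) + 1) + 1 by push_cast; ring,
        PySem.List.pyRange_one_succ_right (by omega : (1 : Int) ≤ (m : Int) + 1)]
    rw [List.foldl_append, ih, Finset.sum_range_succ]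
    simp only [List.foldl_cons, List.foldl_nil]
    rw [show (((m : Int) + 1)).toNat = m + 1 by omega,
        Finset.sum_range_succ, Finset.sum_range_succ]

-- per-element equality of the two fold steps
theorem pvStep (total : Int) (kv : Int × Int) :
    total * ((PySem.List.pyRange 1 (kv.2 + 1) 1).foldl (fun p j => p + kv.1 ^ j.toNat) 1)
      = (if kv.2 > 0 then
          total * (if kv.1 = 1 then kv.2 + 1
                   else PySem.Int.floordiv (kv.1 ^ (kv.2 + 1).toNat - 1) (kv.1 - 1))
         else total) := by
  obtain ⟨p, e⟩ := kv
  by_cases he : e > 0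
  · have hn : e = ((e.toNat : Nat) : Int) := by omega
    simp only [he, if_pos]
    rw [hn, pvInnerSum p e.toNat]
    by_cases hp : p = 1
    · subst hp; simp
    · have hsum : (∑ j ∈ Finset.range (e.toNat + 1), p ^ j) * (p - 1) = p ^ (e.toNat + 1) - 1 :=
        geom_sum_mul p (e.toNat + 1)
      have hne : p - 1 ≠ 0 := by omega
      have htn : (((e.toNat : Nat) : Int) + 1).toNat = e.toNat + 1 := by omega
      rw [if_neg hp, htn, ← hsum]
      show _ = total * PySem.Int.floordiv (_ * (p - 1)) (p - 1)
      rw [show PySem.Int.floordiv ((∑ j ∈ Finset.range (e.toNat + 1), p ^ j) * (p - 1)) (p - 1)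
            = ∑ j ∈ Finset.range (e.toNat + 1), p ^ j from by
        simp [PySem.Int.floordiv, Int.mul_fdiv_cancel _ hne]]
  · simp only [he, if_false]
    rw [PySem.List.pyRange_one_eq_nil (by omega : e + 1 ≤ 1)]
    simp

theorem pvFoldsEq (x : List (Int × Int)) : ∀ (init : Int),
    x.foldl
      (fun total kv =>
        total * ((PySem.List.pyRange 1 (kv.2 + 1) 1).foldl (fun p j => p + kv.1 ^ j.toNat) 1))
      init
    = x.foldl
      (fun total pe =>
        if pe.2 > 0 then
          total * (if pe.1 = 1 then pe.2 + 1
                   else PySem.Int.floordiv (pe.1 ^ (pe.2 + 1).toNat - 1) (pe.1 - 1))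
        else total)
      init := by
  induction x with
  | nil => intro init; rfl
  | cons h t ih =>
    intro init
    simp only [List.foldl_cons]
    rw [pvStep init h]
    exact ih _

-- ===== VERDICT (by name: the statement is the Claim_ definition above) =====
theorem sumDivisor_spec : Claim_equal_sumDivisor := by
  intro x _
  show sumDivisor x = sumDivisor_alt x
  unfold sumDivisor sumDivisor_alt
  exact pvFoldsEq x 1
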